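-- pv_equiv track=rewrite | github.com/JiminyCricket-iso/Lernen | gwp/7/17/aufgabe17/workspace/main.py | tupel
-- ===== SOURCE A (Python) =====
-- def tupel(liste):
--     liste_tupel=[]
--     x=0
--     while x <= len(liste)-3:
--         a=(liste[x],liste[x+1],liste[x+2])
--         liste_tupel.append(a)
--         x+=3
--     return liste_tupel
-- ===== SOURCE B (Python) =====
-- def tupel(liste):
--     # Grouper idiom: zip three references to ONE iterator; each output tuple
--     # consumes three consecutive elements, and zip stops when fewer than
--     # three remain, dropping the incomplete tail.
--     it = iter(liste)
--     return list(zip(it, it, it))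
-- ===== Notes on version B (the rewrite author's own statement) =====
-- stated objective: idiomatic
-- what changed: Replaced the index-stepping while loop (len() test and three indexed reads per step, append into an accumulator) by the standard grouper idiom: zip three references to a single iterator, which consumes the list three elements at a time.
import Mathlib
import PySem

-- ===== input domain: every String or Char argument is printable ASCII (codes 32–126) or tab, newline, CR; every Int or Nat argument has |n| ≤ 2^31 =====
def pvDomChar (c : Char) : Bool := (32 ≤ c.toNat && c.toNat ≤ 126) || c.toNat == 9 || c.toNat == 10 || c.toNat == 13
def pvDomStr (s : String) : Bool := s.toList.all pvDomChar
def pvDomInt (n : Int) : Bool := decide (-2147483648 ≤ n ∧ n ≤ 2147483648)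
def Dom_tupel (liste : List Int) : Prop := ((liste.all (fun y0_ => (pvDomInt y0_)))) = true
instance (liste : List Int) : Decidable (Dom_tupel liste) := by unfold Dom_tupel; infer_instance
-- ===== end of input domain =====

-- ===== PORT A =====
-- while loop of A as tail recursion on the index x; liste[x] is always in range inside the loop
def tupelLoop (liste : List Int) (x : Nat) (acc : List (Int × Int × Int)) : List (Int × Int × Int) :=
  if h : (x : Int) ≤ (liste.length : Int) - 3 then
    tupelLoop liste (x + 3)
      (acc ++ [(liste.getD x 0, liste.getD (x + 1) 0, liste.getD (x + 2) 0)])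
  else acc
termination_by liste.length - x
decreasing_by omega

def tupel (liste : List Int) : List (Int × Int × Int) :=
  tupelLoop liste 0 []

-- ===== PORT B =====
-- B: list(zip(it, it, it)) over one iterator of liste — each zip step pulls three
-- consecutive elements (or stops when fewer than three remain), i.e. it consumes
-- the list three at a time; transliterated as that structural recursion.
def tupel_alt (liste : List Int) : List (Int × Int × Int) :=
  match liste with
  | a :: b :: c :: rest => (a, b, c) :: tupel_alt rest
  | _ => []

-- ===== PRECONDITION & SPEC =====
def Spec_tupel (liste : List Int) (out : List (Int × Int × Int)) : Prop := out = tupel_alt liste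
instance (liste : List Int) (out : List (Int × Int × Int)) : Decidable (Spec_tupel liste out) := by unfold Spec_tupel; infer_instance

-- ===== CLAIM (what is proved, stated in full; the proofs are below) =====
def Claim_equal_tupel : Prop := ∀ (liste : List Int), Dom_tupel liste → Spec_tupel liste (tupel liste)

-- ===== LEMMAS AND PROOFS =====

lemma tupel_alt_short (m : List Int) (h : m.length < 3) : tupel_alt m = [] := by
  match m with
  | [] => rfl
  | [_] => rfl
  | [_, _] => rfl
  | _ :: _ :: _ :: _ => simp at h; omega

lemma tupelLoop_eq (l : List Int) (x : Nat) (acc : List (Int × Int × Int)) :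
    tupelLoop l x acc = acc ++ tupel_alt (l.drop x) := by
  rw [tupelLoop]
  split
  · rename_i h
    rw [tupelLoop_eq l (x + 3)]
    have hlen : x + 3 ≤ l.length := by omega
    have h3 : 3 ≤ (l.drop x).length := by simp; omega
    obtain ⟨a, b, c, rest, hd⟩ : ∃ a b c rest, l.drop x = a :: b :: c :: rest := by
      match hm : l.drop x with
      | a :: b :: c :: rest => exact ⟨a, b, c, rest, rfl⟩
      | [] | [_] | [_, _] => simp [hm] at h3
    have hrest : rest = l.drop (x + 3) := by
      have := congrArg (List.drop 3) hd
      simpa [List.drop_drop, Nat.add_comm] using this.symm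
    have ha : l.getD x 0 = a := by
      have := congrArg (fun m => m.getD 0 (0:Int)) hd
      simpa [List.getD_eq_getElem?_getD, List.getElem?_drop] using this
    have hb : l.getD (x + 1) 0 = b := by
      have := congrArg (fun m => m.getD 1 (0:Int)) hd
      simpa [List.getD_eq_getElem?_getD, List.getElem?_drop] using this
    have hc : l.getD (x + 2) 0 = c := by
      have := congrArg (fun m => m.getD 2 (0:Int)) hd
      simpa [List.getD_eq_getElem?_getD, List.getElem?_drop] using this
    rw [hd, ha, hb, hc, ← hrest]
    simp [tupel_alt]
  · rename_i h
    have : (l.drop x).length < 3 := by simp; omega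
    rw [tupel_alt_short _ this, List.append_nil]
termination_by l.length - x
decreasing_by omega

-- ===== VERDICT (by name: the statement is the Claim_ definition above) =====
theorem tupel_spec : Claim_equal_tupel := by
  intro liste _
  show tupel liste = tupel_alt liste
  rw [tupel, tupelLoop_eq]
  simp
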